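-- pv_equiv track=rewrite | github.com/minsung37/Algorithm | etc/programmers/L2/L2_[3차] 방금그곡.py | solution
-- ===== SOURCE A (Python) =====
-- def solution(m, musicinfos):
--     music_convert = {"C#": "H", "D#": "I", "F#": "J", "G#": "K", "A#": "L"}
--     for convert in music_convert:
--         if convert in m:
--             m = m.replace(convert, music_convert[convert])
--
--     def time_calculate(start, end):
--         start_min, start_second = start.split(":")
--         end_min, end_second = end.split(":")
--         return (int(end_min) * 60 + int(end_second)) - (int(start_min) * 60 + int(start_second))
--
--     dic_music = {}
--     music_order = []
--     for musicinfo in musicinfos: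
--         start_time, end_time, name, sound = musicinfo.split(",")
--         for convert in music_convert:
--             if convert in sound:
--                 sound = sound.replace(convert, music_convert[convert])
--         length = time_calculate(start_time, end_time)
--         music = sound * (length // len(sound) + 1)
--         dic_music[name] = music[:length]
--         music_order.append(name)
--
--     count = []
--     for music in dic_music:
--         if m in dic_music[music]:
--             count.append([music, len(dic_music[music]), music_order.index(music)])
--     if count:
--         count = sorted(count, key=lambda x: (-x[1], x[2]))
--         return count[0][0]
--     return "(None)"
-- ===== SOURCE B (Python) =====
-- def solution(m, musicinfos):
--     music_convert = {"C#": "H", "D#": "I", "F#": "J", "G#": "K", "A#": "L"}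
--     for convert in music_convert:
--         if convert in m:
--             m = m.replace(convert, music_convert[convert])
--
--     melodies = {}
--     for musicinfo in musicinfos:
--         start_time, end_time, name, sound = musicinfo.split(",")
--         for convert in music_convert:
--             if convert in sound:
--                 sound = sound.replace(convert, music_convert[convert])
--         sm, ss = start_time.split(":")
--         em, es = end_time.split(":")
--         length = (int(em) * 60 + int(es)) - (int(sm) * 60 + int(ss))
--         melodies[name] = (sound * (length // len(sound) + 1))[:length]
--
--     best_name, best_len = "(None)", -1
--     for name, melody in melodies.items():
--         if m in melody and best_len < len(melody):
--             best_name, best_len = name, len(melody)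
--     return best_name
-- ===== Notes on version B (the rewrite author's own statement) =====
-- stated objective: simpler
-- what changed: A collects every matching song into a list with its length and first index, sorts it by (-length, index) and returns the head; B keeps the song dictionary only (no order list) and does one insertion-order pass over it keeping a running best that is replaced only by a strictly longer match, which yields the same longest-then-earliest winner without sorting.
import Mathlib
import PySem

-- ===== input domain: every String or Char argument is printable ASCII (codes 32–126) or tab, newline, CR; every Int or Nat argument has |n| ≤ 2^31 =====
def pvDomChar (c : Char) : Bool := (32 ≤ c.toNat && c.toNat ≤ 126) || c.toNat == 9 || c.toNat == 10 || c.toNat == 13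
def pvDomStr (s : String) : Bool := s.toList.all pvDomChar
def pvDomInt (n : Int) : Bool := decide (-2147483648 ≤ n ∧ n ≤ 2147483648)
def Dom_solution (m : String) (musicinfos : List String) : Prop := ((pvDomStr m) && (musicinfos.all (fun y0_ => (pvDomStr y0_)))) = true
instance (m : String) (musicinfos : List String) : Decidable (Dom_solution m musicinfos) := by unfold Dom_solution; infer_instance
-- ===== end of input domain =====

-- B replaces A's collect-all-matches + sort by (-length, first-index) + take-head phase with a single
-- insertion-order pass keeping a running best (strictly-longer wins), dropping the order list entirely
-- (objective: simpler; phases 1-2 — sharp normalisation and melody construction — are shared).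

-- ===== shared helpers (identical lines in both Pythons: sharp conversion, time difference, melody build) =====
def pvConvList : List (String × String) := [("C#","H"),("D#","I"),("F#","J"),("G#","K"),("A#","L")]

def pvSharp (s : String) : String :=
  pvConvList.foldl (fun s kv => if PySem.Str.isIn kv.1 s then PySem.Str.replace s kv.1 kv.2 else s) s

-- 'a, b = t.split(":")' then ints; returns 0 on the unpack/parse failures Pre_ excludes
def pvTimeCalc (start_ end_ : String) : Int :=
  match PySem.Str.split? start_ ":", PySem.Str.split? end_ ":" with
  | some [sm, ss], some [em, es] =>
    match PySem.Int.ofStr? sm, PySem.Int.ofStr? ss, PySem.Int.ofStr? em, PySem.Int.ofStr? es with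
    | some a, some b, some c, some d => (c * 60 + d) - (a * 60 + b)
    | _, _, _, _ => 0
  | _, _ => 0

-- (sound * (length // len(sound) + 1))[:length]
def pvMelody (sound : String) (length : Int) : String :=
  PySem.Str.slice
    (String.ofList (PySem.List.pyRepeat sound.toList (PySem.Int.floordiv length (PySem.Str.len sound) + 1)))
    none (some length)

-- 'start,end,name,sound = musicinfo.split(",")' (none = the ValueError Pre_ excludes)
def pvParse (info : String) : Option (String × String × String × String) :=
  match PySem.Str.split? info "," with
  | some [a, b, c, d] => some (a, b, c, d)
  | _ => none

-- ===== PORT A =====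
def pvIdx (ord : List String) (k : String) : Int := (((PySem.List.index? ord k).getD 0 : Nat) : Int)

def pvStepA (st : PySem.Dict String String × List String) (info : String) :
    PySem.Dict String String × List String :=
  match pvParse info with
  | some (s, e, name, sound) =>
      (st.1.insert name (pvMelody (pvSharp sound) (pvTimeCalc s e)), st.2 ++ [name])
  | none => st

def solution (m : String) (musicinfos : List String) : String :=
  let m := pvSharp m
  let st := musicinfos.foldl pvStepA (PySem.Dict.empty, [])
  let dic := st.1
  let order := st.2
  let count : List (String × Int × Int) := dic.keys.foldl (fun acc music =>
      if PySem.Str.isIn m (dic.getD music "") then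
        acc ++ [(music, PySem.Str.len (dic.getD music ""), pvIdx order music)]
      else acc) []
  if count ≠ [] then
    (((PySem.List.sorted2 count (fun x => -x.2.1) (fun x => x.2.2)).head?).map (fun c => c.1)).getD "(None)"
  else "(None)"

-- ===== PORT B =====
def pvStepB (d : PySem.Dict String String) (info : String) : PySem.Dict String String :=
  match pvParse info with
  | some (s, e, name, sound) => d.insert name (pvMelody (pvSharp sound) (pvTimeCalc s e))
  | none => d

def solution_alt (m : String) (musicinfos : List String) : String :=
  let m := pvSharp m
  let dic := musicinfos.foldl pvStepB PySem.Dict.empty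
  (dic.items.foldl (fun (best : String × Int) p =>
      if PySem.Str.isIn m p.2 && best.2 < PySem.Str.len p.2 then (p.1, PySem.Str.len p.2) else best)
    ("(None)", -1)).1

-- ===== PRECONDITION & SPEC =====
def pvTimeOK (t : String) : Bool :=
  match PySem.Str.split? t ":" with
  | some [x, y] => (PySem.Int.ofStr? x).isSome && (PySem.Int.ofStr? y).isSome
  | _ => false

-- Pre_ excludes exactly the inputs where Python A raises: a musicinfo that does not split on ','
-- into four fields (ValueError), a time field that does not split into two int()-parsable pieces
-- (ValueError), or an empty sound field (ZeroDivisionError in length // len(sound)).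
def Pre_solution (m : String) (musicinfos : List String) : Prop :=
  (musicinfos.all (fun info =>
    match pvParse info with
    | some (a, b, _, sound) => pvTimeOK a && pvTimeOK b && !(sound == "")
    | none => false)) = true
instance (m : String) (musicinfos : List String) : Decidable (Pre_solution m musicinfos) := by
  unfold Pre_solution; infer_instance

def pvWitness_solution : String × List String := ("ABC", ["00:00,00:03,x,ABC", "00:00,00:04,y,ABCA"])

def Spec_solution (m : String) (musicinfos : List String) (out : String) : Prop := out = solution_alt m musicinfos
instance (m : String) (musicinfos : List String) (out : String) : Decidable (Spec_solution m musicinfos out) := by unfold Spec_solution; infer_instance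

-- ===== CLAIM (what is proved, stated in full; the proofs are below) =====
def Claim_equal_solution : Prop := ∀ (m : String) (musicinfos : List String), Dom_solution m musicinfos → Pre_solution m musicinfos → Spec_solution m musicinfos (solution m musicinfos)

-- ===== LEMMAS AND PROOFS =====

-- A's fold state projects onto B's dict
theorem pv_stepA_fst (st : PySem.Dict String String × List String) (i : String) :
    (pvStepA st i).1 = pvStepB st.1 i := by
  unfold pvStepA pvStepB
  cases h : pvParse i with
  | none => rfl
  | some t => obtain ⟨a, b, c, d⟩ := t; rfl

theorem pv_build_fst : ∀ (l : List String) (d : PySem.Dict String String) (ord : List String),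
    (l.foldl pvStepA (d, ord)).1 = l.foldl pvStepB d := by
  intro l
  induction l with
  | nil => intro d ord; rfl
  | cons i t ih =>
      intro d ord
      have h := pv_stepA_fst (d, ord) i
      simp only [List.foldl_cons]
      calc (t.foldl pvStepA (pvStepA (d, ord) i)).1
          = (t.foldl pvStepA ((pvStepA (d, ord) i).1, (pvStepA (d, ord) i).2)).1 := by rfl
        _ = t.foldl pvStepB (pvStepA (d, ord) i).1 := ih _ _
        _ = t.foldl pvStepB (pvStepB d i) := by rw [h]

-- index of a member is a position below the length
theorem pv_idx_lt_length {ord : List String} {k : String} (h : k ∈ ord) :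
    pvIdx ord k < (ord.length : Int) := by
  have hs : (PySem.List.index? ord k).isSome = true := (PySem.List.index?_isSome_iff ord k).2 h
  obtain ⟨j, hj⟩ := Option.isSome_iff_exists.1 hs
  obtain ⟨pre, suf, hdec, hlen, -⟩ := (PySem.List.index?_eq_some_iff ord k j).1 hj
  unfold pvIdx
  rw [hj]
  subst hdec
  simp [← hlen]

-- the build-loop invariant: keys are unique, keys = names seen, items strictly increasing in first index
theorem pv_build_inv : ∀ (l : List String) (d : PySem.Dict String String) (ord : List String),
    d.keys.Nodup → (∀ k, k ∈ d.keys ↔ k ∈ ord) →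
    d.items.Pairwise (fun p q => pvIdx ord p.1 < pvIdx ord q.1) →
    (l.foldl pvStepA (d, ord)).1.keys.Nodup ∧
    (l.foldl pvStepA (d, ord)).1.items.Pairwise
      (fun p q => pvIdx (l.foldl pvStepA (d, ord)).2 p.1 < pvIdx (l.foldl pvStepA (d, ord)).2 q.1) := by
  intro l
  induction l with
  | nil => intro d ord h1 h2 h3; exact ⟨h1, h3⟩
  | cons i t ih =>
      intro d ord h1 h2 h3
      simp only [List.foldl_cons]
      cases hp : pvParse i with
      | none =>
          have : pvStepA (d, ord) i = (d, ord) := by unfold pvStepA; rw [hp]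
          rw [this]; exact ih d ord h1 h2 h3
      | some tup =>
          obtain ⟨s, e, name, sound⟩ := tup
          have hstep : pvStepA (d, ord) i
              = (d.insert name (pvMelody (pvSharp sound) (pvTimeCalc s e)), ord ++ [name]) := by
            unfold pvStepA; rw [hp]
          rw [hstep]
          set v := pvMelody (pvSharp sound) (pvTimeCalc s e) with hv
          -- membership of keys of items
          have hmemk : ∀ p : String × String, p ∈ d.items → p.1 ∈ ord := by
            intro p hpitems
            exact (h2 p.1).1 (List.mem_map_of_mem hpitems)
          -- index preserved for old members
          have hidx : ∀ k, k ∈ ord → pvIdx (ord ++ [name]) k = pvIdx ord k := by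
            intro k hk; unfold pvIdx; rw [PySem.List.index?_append_of_mem _ hk]
          apply ih
          · exact PySem.Dict.nodup_keys_insert d name v h1
          · intro k
            rw [PySem.Dict.mem_keys_insert]
            constructor
            · rintro (rfl | hk)
              · simp
              · exact List.mem_append_left _ ((h2 k).1 hk)
            · intro hk
              rcases List.mem_append.1 hk with hk | hk
              · exact Or.inr ((h2 k).2 hk)
              · exact Or.inl (List.mem_singleton.1 hk)
          · by_cases hc : d.contains name = true
            · rw [PySem.Dict.items_insert_of_contains d v hc]
              rw [List.pairwise_map]
              refine h3.imp_of_mem ?_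
              intro p q hpm hqm hpq
              have hfst : ∀ r : String × String, r ∈ d.items →
                  (if (r.1 == name) = true then (name, v) else r).1 = r.1 := by
                intro r _
                by_cases hb : (r.1 == name) = true
                · simp [eq_of_beq hb]
                · simp [hb]
              rw [hfst p hpm, hfst q hqm, hidx _ (hmemk p hpm), hidx _ (hmemk q hqm)]
              exact hpq
            · rw [PySem.Dict.items_insert_of_not_contains d v (by simpa using hc)]
              rw [List.pairwise_append]
              refine ⟨h3.imp_of_mem ?_, List.pairwise_singleton _ _, ?_⟩
              · intro p q hpm hqm hpq
                rw [hidx _ (hmemk p hpm), hidx _ (hmemk q hqm)]; exact hpq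
              · intro p hpm q hqm
                rw [List.mem_singleton.1 hqm]
                have hnot : name ∉ ord := fun hmem =>
                  hc ((PySem.Dict.contains_iff_mem_keys d name).2 ((h2 name).2 hmem))
                have hidxn : pvIdx (ord ++ [name]) name = (ord.length : Int) := by
                  unfold pvIdx
                  rw [PySem.List.index?_append_singleton_self ord name hnot]
                  rfl
                rw [hidxn, hidx _ (hmemk p hpm)]
                exact lt_of_lt_of_le (pv_idx_lt_length (hmemk p hpm)) (le_refl _)

-- a fold whose step is the identity off p runs over the filtered list
theorem pv_foldl_filter {α β : Type} (p : α → Bool) (f : β → α → β)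
    (h : ∀ b x, p x = false → f b x = b) :
    ∀ (l : List α) (init : β), l.foldl f init = (l.filter p).foldl f init := by
  intro l
  induction l with
  | nil => intro init; rfl
  | cons x t ih =>
      intro init
      by_cases hx : p x = true
      · simp [hx, ih]
      · have hx' : p x = false := by simpa using hx
        simp [hx', h init x hx', ih]

-- head of an insertBy-fold is the strict running best
def pvBestO {α : Type} (lt : α → α → Bool) (h : Option α) (x : α) : Option α :=
  some (h.elim x (fun y => if lt x y then x else y))

theorem pv_head_insertBy {α : Type} (lt : α → α → Bool) (x : α) (acc : List α) :
    (PySem.List.insertBy lt x acc).head? = pvBestO lt acc.head? x := by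
  cases acc with
  | nil => rfl
  | cons y ys =>
      unfold PySem.List.insertBy pvBestO
      by_cases h : lt x y = true
      · simp [h]
      · simp [h]

theorem pv_head_foldl_insertBy {α : Type} (lt : α → α → Bool) :
    ∀ (xs acc : List α),
      (xs.foldl (fun acc x => PySem.List.insertBy lt x acc) acc).head? = xs.foldl (pvBestO lt) acc.head? := by
  intro xs
  induction xs with
  | nil => intro acc; rfl
  | cons x t ih =>
      intro acc
      simp only [List.foldl_cons]
      rw [ih, pv_head_insertBy]

-- the lex comparator A's sort uses
def pvLtA (x h : String × Int × Int) : Bool :=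
  decide (-x.2.1 < -h.2.1) || (!decide (-h.2.1 < -x.2.1) && decide (x.2.2 < h.2.2))

theorem pv_sorted2_head (count : List (String × Int × Int)) :
    (PySem.List.sorted2 count (fun x => -x.2.1) (fun x => x.2.2)).head? = count.foldl (pvBestO pvLtA) none := by
  have : PySem.List.sorted2 count (fun x => -x.2.1) (fun x => x.2.2)
      = count.foldl (fun acc x => PySem.List.insertBy pvLtA x acc) [] := rfl
  rw [this, pv_head_foldl_insertBy]
  rfl

-- running lex-best over strictly index-increasing matches = running strictly-longer-wins best
theorem pv_main (f : (String × String) → Int) :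
    ∀ (L : List (String × String)) (b : String × Int) (j : Int),
      L.Pairwise (fun p q => f p < f q) → (∀ q ∈ L, j < f q) →
      ((L.map (fun p => (p.1, PySem.Str.len p.2, f p))).foldl (pvBestO pvLtA) (some (b.1, b.2, j))).map (·.1)
        = some ((L.foldl (fun best p =>
            if best.2 < PySem.Str.len p.2 then (p.1, PySem.Str.len p.2) else best) b).1) := by
  intro L
  induction L with
  | nil => intro b j _ _; rfl
  | cons q t ih =>
      intro b j hp hj
      have hqj : j < f q := hj q List.mem_cons_self
      have hlt : pvLtA (q.1, PySem.Str.len q.2, f q) (b.1, b.2, j)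
          = decide (b.2 < PySem.Str.len q.2) := by
        unfold pvLtA
        have h2 : decide (f q < j) = false := by simp; omega
        simp only [h2, Bool.and_false, Bool.or_false, neg_lt_neg_iff]
      rw [List.pairwise_cons] at hp
      simp only [List.map_cons, List.foldl_cons]
      have hstep : pvBestO pvLtA (some (b.1, b.2, j)) (q.1, PySem.Str.len q.2, f q)
          = some (if b.2 < PySem.Str.len q.2 then (q.1, PySem.Str.len q.2, f q) else (b.1, b.2, j)) := by
        unfold pvBestO
        simp only [Option.elim]
        rw [hlt]
        simp
      rw [hstep]
      by_cases hb : b.2 < PySem.Str.len q.2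
      · simp only [hb, if_pos]
        have := ih (q.1, PySem.Str.len q.2) (f q) hp.2 (fun r hr => hp.1 r hr)
        simpa using this
      · simp only [hb, if_false]
        have hj' : ∀ r ∈ t, j < f r := fun r hr => lt_trans hqj (hp.1 r hr)
        have := ih b j hp.2 hj'
        simpa [hb] using this

-- 0 ≤ len
theorem pv_len_nonneg (s : String) : (0 : Int) ≤ PySem.Str.len s := by
  rw [PySem.Str.len_eq]; exact Int.natCast_nonneg _

-- ===== VERDICT (by name: the statement is the Claim_ definition above) =====
theorem solution_spec : Claim_equal_solution := by
  intro m musicinfos _ _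
  unfold Spec_solution solution solution_alt
  obtain ⟨hnodup, hpair⟩ := pv_build_inv musicinfos PySem.Dict.empty []
    (by simp [PySem.Dict.keys, PySem.Dict.empty]) (by simp [PySem.Dict.keys, PySem.Dict.empty])
    (by simp [PySem.Dict.empty])
  rw [← pv_build_fst musicinfos PySem.Dict.empty []]
  dsimp only
  set m' := pvSharp m with hm'
  set st := musicinfos.foldl pvStepA (PySem.Dict.empty, []) with hst
  set dic := st.1 with hdic
  set order := st.2 with horder
  -- characterize A's count as a map over the filtered items
  have hcount : dic.keys.foldl (fun acc music =>
      if PySem.Str.isIn m' (dic.getD music "") then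
        acc ++ [(music, PySem.Str.len (dic.getD music ""), pvIdx order music)]
      else acc) []
      = ((dic.items.filter (fun p => PySem.Str.isIn m' p.2)).map
          (fun p => (p.1, PySem.Str.len p.2, pvIdx order p.1))) := by
    have hkeys : dic.keys = dic.items.map (fun p => p.1) := rfl
    rw [hkeys, List.foldl_map]
    rw [PySem.List.foldl_congr_mem dic.items _ (fun acc p =>
        if PySem.Str.isIn m' p.2 then acc ++ [(p.1, PySem.Str.len p.2, pvIdx order p.1)] else acc) []
        (by
          intro acc p hp
          have hgd : dic.getD p.1 "" = p.2 :=
            PySem.Dict.getD_of_mem_items dic (by simpa using hp) hnodup ""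
          rw [hgd])]
    rw [PySem.List.foldl_append_if]
    rfl
  rw [hcount]
  -- B's fold runs over the same filtered items
  have hB : dic.items.foldl (fun (best : String × Int) p =>
        if PySem.Str.isIn m' p.2 && best.2 < PySem.Str.len p.2 then (p.1, PySem.Str.len p.2) else best)
        ("(None)", -1)
      = (dic.items.filter (fun p => PySem.Str.isIn m' p.2)).foldl (fun (best : String × Int) p =>
          if best.2 < PySem.Str.len p.2 then (p.1, PySem.Str.len p.2) else best) ("(None)", -1) := by
    rw [pv_foldl_filter (fun p => PySem.Str.isIn m' p.2) _
      (by intro b x hx; simp only at hx; rw [hx]; simp)]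
    apply PySem.List.foldl_congr_mem
    intro acc p hp
    have := (List.mem_filter.1 hp).2
    rw [this]
    simp
  rw [hB]
  set M := dic.items.filter (fun p => PySem.Str.isIn m' p.2) with hM
  have hpairM : M.Pairwise (fun p q => pvIdx order p.1 < pvIdx order q.1) := hpair.filter _
  cases hMc : M with
  | nil => simp
  | cons q rest =>
      rw [hMc] at hpairM
      rw [List.pairwise_cons] at hpairM
      simp only [List.map_cons, ne_eq, reduceCtorEq, not_false_eq_true, if_true]
      rw [pv_sorted2_head]
      simp only [List.foldl_cons]
      have hfirst : pvBestO pvLtA none (q.1, PySem.Str.len q.2, pvIdx order q.1)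
          = some ((q.1, PySem.Str.len q.2).1, (q.1, PySem.Str.len q.2).2, pvIdx order q.1) := rfl
      rw [hfirst, pv_main (fun p => pvIdx order p.1) rest (q.1, PySem.Str.len q.2)
        (pvIdx order q.1) hpairM.2 hpairM.1]
      have hq0 : ((-1 : Int) < PySem.Str.len q.2) := lt_of_lt_of_le (by norm_num) (pv_len_nonneg q.2)
      rw [if_pos hq0]
      rfl
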